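-- pv_equiv track=rewrite | github.com/elsayied/pptx_lang | real_pptx_utils.py | _split_bullet_block
-- ===== SOURCE A (Python) =====
-- from typing import Dict, List
-- from typing import Dict, List
-- from typing import Dict, List
--
-- def _split_bullet_block(content: str, limit: int) -> List[Dict]:
--     """Splits a large bulleted list into smaller ones based on top-level items."""
--     lines = content.split("\n")
--     if not lines:
--         return []
--
--     min_indent = float("inf")
--     for line in lines:
--         if line.strip():
--             min_indent = min(min_indent, len(line) - len(line.lstrip()))
--
--     items = []
--     current_item_lines = []
--     for line in lines:
--         if line.strip():
--             indent = len(line) - len(line.lstrip())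
--             if indent == min_indent and line.lstrip().startswith(("-", "*", "+")):
--                 if current_item_lines:
--                     items.append("\n".join(current_item_lines))
--                 current_item_lines = [line]
--             else:
--                 current_item_lines.append(line)
--         elif current_item_lines:
--             current_item_lines.append(line)
--
--     if current_item_lines:
--         items.append("\n".join(current_item_lines))
--
--     chunks = []
--     current_chunk = []
--     current_len = 0
--     for item in items:
--         item_len = item.count("\n") + 1
--         if current_len + item_len > limit and current_chunk:
--             chunks.append("\n".join(current_chunk))
--             current_chunk = [item]
--             current_len = item_len
--         else:
--             current_chunk.append(item)
--             current_len += item_len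
--
--     if current_chunk:
--         chunks.append("\n".join(current_chunk))
--
--     return [{"type": "bullet", "content": chunk} for chunk in chunks if chunk.strip()]
-- ===== SOURCE B (Python) =====
-- from typing import Dict, List
--
--
-- def _split_bullet_block(content: str, limit: int) -> List[Dict]:
--     """Splits a large bulleted list into smaller ones based on top-level items."""
--     lines = content.split("\n")
--     indents = [len(l) - len(l.lstrip()) for l in lines if l.strip()]
--     if not indents:
--         return []
--     min_indent = min(indents)
--
--     def is_start(l):
--         return (bool(l.strip()) and len(l) - len(l.lstrip()) == min_indent
--                 and l.lstrip().startswith(("-", "*", "+")))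
--
--     # drop blank lines before the first content line
--     rest = lines
--     while rest and not rest[0].strip():
--         rest = rest[1:]
--
--     # cut the remaining lines into items: each item starts at its first line
--     # and extends up to (not including) the next top-level bullet-start line
--     items = []
--     while rest:
--         j = 1
--         while j < len(rest) and not is_start(rest[j]):
--             j += 1
--         items.append("\n".join(rest[:j]))
--         rest = rest[j:]
--
--     # greedy packing: each chunk is a maximal run of items fitting the limit
--     chunks = []
--     while items:
--         total = items[0].count("\n") + 1
--         k = 1
--         while k < len(items) and total + items[k].count("\n") + 1 <= limit:
--             total += items[k].count("\n") + 1
--             k += 1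
--         chunks.append("\n".join(items[:k]))
--         items = items[k:]
--
--     return [{"type": "bullet", "content": c} for c in chunks if c.strip()]
-- ===== Notes on version B (the rewrite author's own statement) =====
-- stated objective: alternative
-- what changed: Items are rebuilt by cutting the line list at bullet-start boundaries (takeWhile/dropWhile style grouping after dropping leading blanks) and chunks by a greedy take/drop recursion, replacing A's two stateful accumulate-and-flush passes.
import Mathlib
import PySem

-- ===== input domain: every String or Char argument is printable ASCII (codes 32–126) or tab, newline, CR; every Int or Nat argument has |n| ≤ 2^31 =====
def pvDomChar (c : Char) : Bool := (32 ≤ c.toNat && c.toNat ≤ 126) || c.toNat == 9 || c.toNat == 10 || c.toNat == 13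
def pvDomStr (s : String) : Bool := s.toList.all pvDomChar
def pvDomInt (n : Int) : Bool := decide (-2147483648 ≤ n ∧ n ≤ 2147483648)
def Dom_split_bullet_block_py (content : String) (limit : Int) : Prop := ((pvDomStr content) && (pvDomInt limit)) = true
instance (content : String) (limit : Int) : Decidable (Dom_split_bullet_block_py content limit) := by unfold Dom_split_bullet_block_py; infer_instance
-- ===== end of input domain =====

-- B rebuilds the items by cutting the line list at bullet-start boundaries (takeWhile/dropWhile
-- recursion) and packs chunks by a greedy take/drop recursion, instead of A's two stateful
-- accumulate-and-flush passes; objective: alternative decomposition, same cost.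


-- per-line primitives (the exact per-line Python expressions both programs use)
def pvBlank (l : String) : Bool := PySem.Str.strip l == ""
def pvIndent (l : String) : Int := (PySem.Str.len l : Int) - (PySem.Str.len (PySem.Str.lstrip l) : Int)
def pvBullet (l : String) : Bool :=
  PySem.Str.startswith (PySem.Str.lstrip l) "-" || PySem.Str.startswith (PySem.Str.lstrip l) "*" ||
    PySem.Str.startswith (PySem.Str.lstrip l) "+"
def pvSize (it : String) : Int := (PySem.Str.count it "\n" : Int) + 1

-- ===== PORT A =====
-- A: min_indent starts at float('inf'); modelled as Option Int (none = inf), exact since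
-- min(inf, n) = n and 'indent == inf' is False for every int indent.
def pvStepMinA (m : Option Int) (l : String) : Option Int :=
  if !pvBlank l then some (match m with | none => pvIndent l | some v => min v (pvIndent l)) else m

def pvIsStartA (mi : Option Int) (l : String) : Bool := (some (pvIndent l) == mi) && pvBullet l

def pvStepItemsA (mi : Option Int) (st : List String × List String) (l : String) :
    List String × List String :=
  if !pvBlank l then
    if pvIsStartA mi l then
      if !st.2.isEmpty then (st.1 ++ [PySem.Str.join "\n" st.2], [l]) else (st.1, [l])
    else (st.1, st.2 ++ [l])
  else if !st.2.isEmpty then (st.1, st.2 ++ [l]) else st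

def pvStepChunksA (limit : Int) (st : List String × List String × Int) (it : String) :
    List String × List String × Int :=
  if st.2.2 + pvSize it > limit && !st.2.1.isEmpty then
    (st.1 ++ [PySem.Str.join "\n" st.2.1], [it], pvSize it)
  else (st.1, st.2.1 ++ [it], st.2.2 + pvSize it)

def split_bullet_block_py (content : String) (limit : Int) : List (List (String × String)) :=
  let lines := (PySem.Str.split? content "\n").getD []  -- sep "\n" ≠ "": split? is always some (exact)
  if lines.isEmpty then [] else
  let minIndent := lines.foldl pvStepMinA none
  let p := lines.foldl (pvStepItemsA minIndent) ([], [])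
  let items := if !p.2.isEmpty then p.1 ++ [PySem.Str.join "\n" p.2] else p.1
  let q := items.foldl (pvStepChunksA limit) ([], [], 0)
  let chunks := if !q.2.1.isEmpty then q.1 ++ [PySem.Str.join "\n" q.2.1] else q.1
  (chunks.filter (fun c => !pvBlank c)).map (fun c => [("type", "bullet"), ("content", c)])

-- ===== PORT B =====
def pvIsStartB (mi : Int) (l : String) : Bool := !pvBlank l && (pvIndent l == mi) && pvBullet l

-- cut the lines into items: each item runs up to the next bullet-start line
def pvGroups (mi : Int) : List String → List (List String)
  | [] => []
  | l :: rest =>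
    (l :: rest.takeWhile (fun x => !pvIsStartB mi x)) ::
      pvGroups mi (rest.dropWhile (fun x => !pvIsStartB mi x))
  termination_by xs => xs.length
  decreasing_by
    have := List.length_dropWhile_le (fun x => !pvIsStartB mi x) rest
    simp only [List.length_cons]; omega

-- how many further items still fit into the current chunk
def pvExtent (limit : Int) (total : Int) : List String → Nat
  | [] => 0
  | it :: rest => if total + pvSize it ≤ limit then pvExtent limit (total + pvSize it) rest + 1 else 0

def pvPack (limit : Int) : List String → List String
  | [] => []
  | it :: rest =>
    let k := pvExtent limit (pvSize it) rest
    PySem.Str.join "\n" (it :: rest.take k) :: pvPack limit (rest.drop k)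
  termination_by xs => xs.length
  decreasing_by
    simp only [List.length_cons, List.length_drop]; omega

def split_bullet_block_py_alt (content : String) (limit : Int) : List (List (String × String)) :=
  let lines := (PySem.Str.split? content "\n").getD []
  match (lines.filter (fun l => !pvBlank l)).map pvIndent with
  | [] => []
  | i :: is =>
    let mi := is.foldl min i
    let items := (pvGroups mi (lines.dropWhile pvBlank)).map (PySem.Str.join "\n")
    let chunks := pvPack limit items
    (chunks.filter (fun c => !pvBlank c)).map (fun c => [("type", "bullet"), ("content", c)])

-- ===== PRECONDITION & SPEC =====
def Spec_split_bullet_block_py (content : String) (limit : Int) (out : List (List (String × String))) : Prop := out = split_bullet_block_py_alt content limit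
instance (content : String) (limit : Int) (out : List (List (String × String))) : Decidable (Spec_split_bullet_block_py content limit out) := by unfold Spec_split_bullet_block_py; infer_instance

-- ===== CLAIM (what is proved, stated in full; the proofs are below) =====
def Claim_equal_split_bullet_block_py : Prop := ∀ (content : String) (limit : Int), Dom_split_bullet_block_py content limit → Spec_split_bullet_block_py content limit (split_bullet_block_py content limit)

-- ===== LEMMAS AND PROOFS =====

theorem pvGroups_nil (mi : Int) : pvGroups mi [] = [] := by rw [pvGroups]

theorem pvGroups_cons (mi : Int) (l : String) (rest : List String) :
    pvGroups mi (l :: rest) =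
      (l :: rest.takeWhile (fun x => !pvIsStartB mi x)) ::
        pvGroups mi (rest.dropWhile (fun x => !pvIsStartB mi x)) := by rw [pvGroups]

theorem pvPack_nil (limit : Int) : pvPack limit [] = [] := by rw [pvPack]

theorem pvPack_cons (limit : Int) (it : String) (rest : List String) :
    pvPack limit (it :: rest) =
      PySem.Str.join "\n" (it :: rest.take (pvExtent limit (pvSize it) rest)) ::
        pvPack limit (rest.drop (pvExtent limit (pvSize it) rest)) := by rw [pvPack]

-- A's min fold only looks at non-blank lines
theorem foldMinA_filter (xs : List String) (m : Option Int) :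
    xs.foldl pvStepMinA m =
      ((xs.filter (fun l => !pvBlank l)).map pvIndent).foldl
        (fun m v => some (match m with | none => v | some a => min a v)) m := by
  induction xs generalizing m with
  | nil => rfl
  | cons x xs ih =>
    by_cases h : pvBlank x = true <;> simp [pvStepMinA, h, ih]

theorem foldOMin_some (vs : List Int) (a : Int) :
    vs.foldl (fun m v => some (match m with | none => v | some a' => min a' v)) (some a) =
      some (vs.foldl min a) := by
  induction vs generalizing a with
  | nil => rfl
  | cons v vs ih => simp [List.foldl_cons, ih]

theorem stepItems_not_start {mi : Int} {l : String} (hs : pvIsStartB mi l = false)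
    {its cur : List String} (hc : cur.isEmpty = false) :
    pvStepItemsA (some mi) (its, cur) l = (its, cur ++ [l]) := by
  by_cases hb : pvBlank l = true
  · simp [pvStepItemsA, hb, hc]
  · have : pvIsStartA (some mi) l = false := by
      simp only [pvIsStartB, hb, Bool.not_false, Bool.true_and] at hs
      simpa [pvIsStartA] using hs
    simp [pvStepItemsA, hb, this]

theorem stepItems_start {mi : Int} {l : String} (hs : pvIsStartB mi l = true)
    {its cur : List String} (hc : cur.isEmpty = false) :
    pvStepItemsA (some mi) (its, cur) l = (its ++ [PySem.Str.join "\n" cur], [l]) := by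
  simp only [pvIsStartB, Bool.and_eq_true, Bool.not_eq_eq_eq_not, Bool.not_true, beq_iff_eq] at hs
  obtain ⟨⟨hb, hi⟩, hbl⟩ := hs
  have : pvIsStartA (some mi) l = true := by simp [pvIsStartA, hi, hbl]
  simp [pvStepItemsA, hb, this, hc]

def pvFinItems (p : List String × List String) : List String :=
  if !p.2.isEmpty then p.1 ++ [PySem.Str.join "\n" p.2] else p.1

theorem items_main (mi : Int) (xs : List String) (its cur : List String)
    (hc : cur.isEmpty = false) :
    pvFinItems (xs.foldl (pvStepItemsA (some mi)) (its, cur)) =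
      its ++
        ((cur ++ xs.takeWhile (fun x => !pvIsStartB mi x)) ::
            pvGroups mi (xs.dropWhile (fun x => !pvIsStartB mi x))).map (PySem.Str.join "\n") := by
  induction xs generalizing its cur with
  | nil =>
    simp [pvFinItems, hc, pvGroups_nil]
  | cons x xs ih =>
    by_cases hs : pvIsStartB mi x = true
    · rw [List.foldl_cons, stepItems_start hs hc,
        ih (its ++ [PySem.Str.join "\n" cur]) [x] (by simp)]
      simp [hs, pvGroups_cons]
    · have hs' : pvIsStartB mi x = false := by simpa using hs
      rw [List.foldl_cons, stepItems_not_start hs' hc, ih its (cur ++ [x]) (by simp)]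
      simp [hs']

theorem items_lead (mi : Int) (xs : List String) (its : List String) :
    pvFinItems (xs.foldl (pvStepItemsA (some mi)) (its, [])) =
      its ++ (pvGroups mi (xs.dropWhile pvBlank)).map (PySem.Str.join "\n") := by
  induction xs generalizing its with
  | nil => simp [pvFinItems, pvGroups_nil]
  | cons x xs ih =>
    by_cases hb : pvBlank x = true
    · have : pvStepItemsA (some mi) (its, []) x = (its, []) := by
        simp [pvStepItemsA, hb]
      rw [List.foldl_cons, this, ih its]
      simp [hb]
    · have hstep : pvStepItemsA (some mi) (its, []) x = (its, [x]) := by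
        by_cases hs : pvIsStartA (some mi) x = true <;> simp [pvStepItemsA, hb, hs]
      rw [List.foldl_cons, hstep, items_main mi xs its [x] (by simp)]
      have hb' : pvBlank x = false := by simpa using hb
      simp [hb', pvGroups_cons]

theorem items_all_blank (miO : Option Int) (xs : List String) (its : List String)
    (h : ∀ l ∈ xs, pvBlank l = true) :
    xs.foldl (pvStepItemsA miO) (its, []) = (its, []) := by
  induction xs with
  | nil => rfl
  | cons x xs ih =>
    have hx := h x (by simp)
    have hstep : pvStepItemsA miO (its, []) x = (its, []) := by simp [pvStepItemsA, hx]
    rw [List.foldl_cons, hstep, ih (fun l hl => h l (by simp [hl]))]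

def pvFinChunks (q : List String × List String × Int) : List String :=
  if !q.2.1.isEmpty then q.1 ++ [PySem.Str.join "\n" q.2.1] else q.1

theorem chunks_main (limit : Int) (xs : List String) (chs cur : List String) (len : Int)
    (hc : cur.isEmpty = false) :
    pvFinChunks (xs.foldl (pvStepChunksA limit) (chs, cur, len)) =
      chs ++
        (PySem.Str.join "\n" (cur ++ xs.take (pvExtent limit len xs)) ::
          pvPack limit (xs.drop (pvExtent limit len xs))) := by
  induction xs generalizing chs cur len with
  | nil => simp [pvFinChunks, hc, pvExtent, pvPack_nil]
  | cons x xs ih =>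
    by_cases hfit : len + pvSize x ≤ limit
    · have hcond : (len + pvSize x > limit && !cur.isEmpty) = false := by
        simp only [Bool.and_eq_false_iff]; left; simpa using hfit
      have hstep : pvStepChunksA limit (chs, cur, len) x = (chs, cur ++ [x], len + pvSize x) := by
        simp [pvStepChunksA, hcond]
      rw [List.foldl_cons, hstep, ih chs (cur ++ [x]) (len + pvSize x) (by simp)]
      simp [pvExtent, hfit, List.append_assoc]
    · have hcond : (len + pvSize x > limit && !cur.isEmpty) = true := by
        simp only [Bool.and_eq_true]
        exact ⟨by simpa using (by omega : len + pvSize x > limit), by simp [hc]⟩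
      have hstep : pvStepChunksA limit (chs, cur, len) x =
          (chs ++ [PySem.Str.join "\n" cur], [x], pvSize x) := by
        simp [pvStepChunksA, hcond]
      rw [List.foldl_cons, hstep,
        ih (chs ++ [PySem.Str.join "\n" cur]) [x] (pvSize x) (by simp)]
      simp [pvExtent, hfit, pvPack_cons]

theorem chunks_lead (limit : Int) (xs : List String) (chs : List String) :
    pvFinChunks (xs.foldl (pvStepChunksA limit) (chs, [], 0)) = chs ++ pvPack limit xs := by
  cases xs with
  | nil => simp [pvFinChunks, pvPack_nil]
  | cons x xs =>
    have hstep : pvStepChunksA limit (chs, [], 0) x = (chs, [x], 0 + pvSize x) := by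
      simp [pvStepChunksA]
    rw [List.foldl_cons, hstep]
    have h0 : (0 : Int) + pvSize x = pvSize x := by ring
    rw [h0, chunks_main limit xs chs [x] (pvSize x) (by simp)]
    simp [pvPack_cons]

-- ===== VERDICT (by name: the statement is the Claim_ definition above) =====
theorem split_bullet_block_py_spec : Claim_equal_split_bullet_block_py := by
  intro content limit _
  unfold Spec_split_bullet_block_py split_bullet_block_py split_bullet_block_py_alt
  set lines := (PySem.Str.split? content "\n").getD [] with hlines
  cases hflt : (lines.filter (fun l => !pvBlank l)).map pvIndent with
  | nil =>
    -- every line is blank: A builds no items, hence no chunks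
    have hall : ∀ l ∈ lines, pvBlank l = true := by
      intro l hl
      by_contra hnb
      have hnb' : (!pvBlank l) = true := by simp at hnb ⊢; exact hnb
      have : pvIndent l ∈ (lines.filter (fun l => !pvBlank l)).map pvIndent :=
        List.mem_map_of_mem (List.mem_filter.mpr ⟨hl, hnb'⟩)
      rw [hflt] at this; exact absurd this (List.not_mem_nil)
    by_cases hemp : lines.isEmpty = true
    · simp [hemp, hflt]
    · simp only [hemp]
      rw [items_all_blank _ lines [] hall]
      simp [hflt]
  | cons i is =>
    -- some non-blank line exists: min_indent is the real minimum
    have hne : lines.isEmpty = false := by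
      rcases lines with _ | ⟨a, as⟩
      · simp at hflt
      · simp
    have hmin : lines.foldl pvStepMinA none = some (is.foldl min i) := by
      rw [foldMinA_filter, hflt, List.foldl_cons]
      exact foldOMin_some is i
    simp only [hne, Bool.false_eq_true, if_false, hmin]
    rw [show (if !(lines.foldl (pvStepItemsA (some (is.foldl min i))) ([], [])).2.isEmpty then
        (lines.foldl (pvStepItemsA (some (is.foldl min i))) ([], [])).1 ++
          [PySem.Str.join "\n" (lines.foldl (pvStepItemsA (some (is.foldl min i))) ([], [])).2]
      else (lines.foldl (pvStepItemsA (some (is.foldl min i))) ([], [])).1) =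
        pvFinItems (lines.foldl (pvStepItemsA (some (is.foldl min i))) ([], [])) from rfl,
      items_lead (is.foldl min i) lines []]
    rw [show ∀ q : List String × List String × Int,
        (if !q.2.1.isEmpty then q.1 ++ [PySem.Str.join "\n" q.2.1] else q.1) = pvFinChunks q
      from fun q => rfl, chunks_lead]
    rw [hflt]
    simp
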